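-- pv_equiv track=rewrite | github.com/pypi-data/pypi-mirror-300 | packages/certified/certified-0.9.0-py3-none-any.whl/certified/fast.py | name_from_peer
-- ===== SOURCE A (Python) =====
-- from typing import Dict, Any, Annotated, Optional, Union, List
--
-- def name_from_peer(peer : Dict[str,Any]) -> str:
--     name = None
--     for nlist in peer["subject"]:
--         for n in nlist:
--             if n[0] == 'commonName':
--                 if name is None or name.startswith("cn:"):
--                     name = f"cn:{n[1]}"
--             elif n[0] == 'userID':
--                 name = f"uid:{n[1]}"
--     if name is None:
--         raise ValueError("No usable name in peer certificate.")
--     return name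
-- ===== SOURCE B (Python) =====
-- def name_from_peer(peer):
--     # Flatten once, then scan the entries backwards with early exit:
--     # the first userID seen from the end wins; otherwise the first
--     # commonName seen from the end; otherwise no usable name.
--     entries = [n for nlist in peer["subject"] for n in nlist]
--     for n in reversed(entries):
--         if n[0] == 'userID':
--             return f"uid:{n[1]}"
--     for n in reversed(entries):
--         if n[0] == 'commonName':
--             return f"cn:{n[1]}"
--     raise ValueError("No usable name in peer certificate.")
-- ===== Notes on version B (the rewrite author's own statement) =====
-- stated objective: alternative
-- what changed: Replaces A's single forward pass with a stateful conditional merge into one `name` variable by a flatten step followed by backward scans with early return: first userID from the end, else first commonName from the end; no accumulator state at all.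
import Mathlib
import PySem

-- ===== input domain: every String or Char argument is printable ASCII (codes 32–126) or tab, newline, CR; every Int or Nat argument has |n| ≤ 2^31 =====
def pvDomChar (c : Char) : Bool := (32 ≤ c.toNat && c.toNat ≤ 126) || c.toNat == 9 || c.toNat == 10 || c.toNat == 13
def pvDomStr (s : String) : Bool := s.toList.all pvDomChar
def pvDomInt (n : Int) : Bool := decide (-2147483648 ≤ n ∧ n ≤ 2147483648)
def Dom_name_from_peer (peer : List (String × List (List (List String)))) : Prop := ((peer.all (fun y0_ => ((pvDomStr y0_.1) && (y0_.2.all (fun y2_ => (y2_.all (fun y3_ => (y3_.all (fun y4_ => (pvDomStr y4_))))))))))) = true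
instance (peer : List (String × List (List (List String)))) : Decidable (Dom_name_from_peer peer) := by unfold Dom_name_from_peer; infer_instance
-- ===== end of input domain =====

-- B replaces A's forward pass with one stateful `name` variable by a flatten step and
-- two backward scans with early return (last userID wins, else last commonName): alternative.

-- ===== PORT A =====
-- step of A's inner loop; `name` is Option String (none = Python's None).
-- n[1] is read via pyGetD with a dummy default — under Pre_ every entry whose n[1]
-- Python actually reads has length ≥ 2, so the default is never used where Python returns.
def nfpStepA (name : Option String) (n : List String) : Option String :=
  if PySem.List.pyGet? n 0 = some "commonName" then
    if name.isNone || PySem.Str.startswith (name.getD "") "cn:" then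
      some ("cn:" ++ PySem.List.pyGetD n 1 "")
    else name
  else if PySem.List.pyGet? n 0 = some "userID" then
    some ("uid:" ++ PySem.List.pyGetD n 1 "")
  else name

def name_from_peer (peer : List (String × List (List (List String)))) : String :=
  -- peer["subject"]: KeyError (get? = none) is excluded by Pre_; "" stands for the ValueError raise, also excluded
  let subject := ((PySem.Dict.mk peer).get? "subject").getD []
  let name := subject.foldl (fun name nlist => nlist.foldl nfpStepA name) (none : Option String)
  name.getD ""

-- ===== PORT B =====
def nfpIsUid (n : List String) : Bool := PySem.List.pyGet? n 0 == some "userID"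
def nfpIsCn (n : List String) : Bool := PySem.List.pyGet? n 0 == some "commonName"

def name_from_peer_alt (peer : List (String × List (List (List String)))) : String :=
  let subject := ((PySem.Dict.mk peer).get? "subject").getD []
  let entries := subject.flatMap (fun nlist => nlist)   -- the comprehension [n for nlist in … for n in nlist]
  match entries.reverse.find? nfpIsUid with             -- first backward pass, early return
  | some n => "uid:" ++ PySem.List.pyGetD n 1 ""
  | none =>
    match entries.reverse.find? nfpIsCn with            -- second backward pass, early return
    | some n => "cn:" ++ PySem.List.pyGetD n 1 ""
    | none => ""                                        -- ValueError, excluded by Pre_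

-- ===== PRECONDITION & SPEC =====
-- Pre_ holds exactly on the inputs where Python A returns normally, and excludes only raises:
-- a missing "subject" key (KeyError), an empty entry or a value-less userID entry anywhere,
-- or a value-less commonName entry occurring before the first userID entry (IndexError — after
-- a userID, A's guard skips it), and no usable entry at all (ValueError).
def Pre_name_from_peer (peer : List (String × List (List (List String)))) : Prop :=
  ((PySem.Dict.mk peer).get? "subject").isSome = true ∧
  (∀ n ∈ (((PySem.Dict.mk peer).get? "subject").getD []).flatMap (fun nlist => nlist),
      n ≠ [] ∧ (n.head? = some "userID" → 2 ≤ n.length)) ∧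
  (∀ n ∈ ((((PySem.Dict.mk peer).get? "subject").getD []).flatMap (fun nlist => nlist)).takeWhile
        (fun m => m.head? ≠ some "userID"),
      n.head? = some "commonName" → 2 ≤ n.length) ∧
  (∃ n ∈ (((PySem.Dict.mk peer).get? "subject").getD []).flatMap (fun nlist => nlist),
      n.head? = some "commonName" ∨ n.head? = some "userID")
instance (peer : List (String × List (List (List String)))) : Decidable (Pre_name_from_peer peer) := by
  unfold Pre_name_from_peer; infer_instance

def pvWitness_name_from_peer : (List (String × List (List (List String)))) :=
  [("subject", [[["commonName", "alice"]], [["userID", "bob"]]])]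

def Spec_name_from_peer (peer : List (String × List (List (List String)))) (out : String) : Prop := out = name_from_peer_alt peer
instance (peer : List (String × List (List (List String)))) (out : String) : Decidable (Spec_name_from_peer peer out) := by unfold Spec_name_from_peer; infer_instance

-- ===== CLAIM (what is proved, stated in full; the proofs are below) =====
def Claim_equal_name_from_peer : Prop := ∀ (peer : List (String × List (List (List String)))), Dom_name_from_peer peer → Pre_name_from_peer peer → Spec_name_from_peer peer (name_from_peer peer)

-- ===== LEMMAS AND PROOFS =====

-- proof-side pair state (last uid value, last cn value) abstracting A's single variable
def nfpPair (st : Option String × Option String) (n : List String) : Option String × Option String :=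
  if nfpIsUid n then (some (PySem.List.pyGetD n 1 ""), st.2)
  else if nfpIsCn n then (st.1, some (PySem.List.pyGetD n 1 ""))
  else st

def nfpRho (st : Option String × Option String) : Option String :=
  match st.1 with
  | some u => some ("uid:" ++ u)
  | none => st.2.map (fun c => "cn:" ++ c)

def nfpOr (a b : Option String) : Option String :=
  match a with | some x => some x | none => b

theorem nfp_sw_cn (y : List Char) : PySem.Chars.startswith ('c' :: 'n' :: ':' :: y) ['c', 'n', ':'] = true := by
  simp [PySem.Chars.startswith, List.isPrefixOf]

theorem nfp_sw_uid (y : List Char) : PySem.Chars.startswith ('u' :: 'i' :: 'd' :: ':' :: y) ['c', 'n', ':'] = false := by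
  simp [PySem.Chars.startswith, List.isPrefixOf]

theorem nfp_step (st : Option String × Option String) (n : List String) :
    nfpStepA (nfpRho st) n = nfpRho (nfpPair st n) := by
  unfold nfpStepA nfpPair nfpIsUid nfpIsCn
  by_cases hc : PySem.List.pyGet? n 0 = some "commonName"
  · have hu : ¬ PySem.List.pyGet? n 0 = some "userID" := by rw [hc]; simp
    rcases st with ⟨u, c⟩
    cases u with
    | some x => simp [hc, nfpRho, nfp_sw_uid]
    | none =>
      cases c with
      | some y => simp [hc, nfpRho, nfp_sw_cn]
      | none => simp [hc, nfpRho]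
  · by_cases hu : PySem.List.pyGet? n 0 = some "userID"
    · simp [hu, nfpRho]
    · simp [hc, hu]

theorem nfp_uid_not_cn (n : List String) (h : nfpIsUid n = true) : nfpIsCn n = false := by
  unfold nfpIsUid at h
  unfold nfpIsCn
  simp only [beq_iff_eq] at h ⊢
  rw [h]; simp

-- the pair fold computes the last uid / last cn values, i.e. the backward find?s
theorem nfpPair_fold (l : List (List String)) (st : Option String × Option String) :
    l.foldl nfpPair st =
      (nfpOr ((l.reverse.find? nfpIsUid).map (fun n => PySem.List.pyGetD n 1 "")) st.1,
       nfpOr ((l.reverse.find? nfpIsCn).map (fun n => PySem.List.pyGetD n 1 "")) st.2) := by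
  induction l generalizing st with
  | nil => simp [nfpOr]
  | cons n rest ih =>
    simp only [List.foldl_cons, List.reverse_cons, List.find?_append]
    rw [ih]
    by_cases hu : nfpIsUid n = true
    · have hc := nfp_uid_not_cn n hu
      cases hfu : rest.reverse.find? nfpIsUid <;>
        cases hfc : rest.reverse.find? nfpIsCn <;>
          simp [nfpPair, hu, hc, nfpOr]
    · by_cases hc : nfpIsCn n = true
      · have hu' : nfpIsUid n = false := by revert hu; cases nfpIsUid n <;> simp
        cases hfu : rest.reverse.find? nfpIsUid <;>
          cases hfc : rest.reverse.find? nfpIsCn <;>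
            simp [nfpPair, hu', hc, nfpOr]
      · have hu' : nfpIsUid n = false := by revert hu; cases nfpIsUid n <;> simp
        have hc' : nfpIsCn n = false := by revert hc; cases nfpIsCn n <;> simp
        cases hfu : rest.reverse.find? nfpIsUid <;>
          cases hfc : rest.reverse.find? nfpIsCn <;>
            simp [nfpPair, hu', hc', nfpOr]

theorem nfp_inner (nlist : List (List String)) (st : Option String × Option String) :
    nlist.foldl nfpStepA (nfpRho st) = nfpRho (nlist.foldl nfpPair st) := by
  induction nlist generalizing st with
  | nil => rfl
  | cons n rest ih => simp only [List.foldl_cons, nfp_step, ih]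

theorem nfp_outer (subject : List (List (List String))) (st : Option String × Option String) :
    subject.foldl (fun name nlist => nlist.foldl nfpStepA name) (nfpRho st)
      = nfpRho (subject.foldl (fun st nlist => nlist.foldl nfpPair st) st) := by
  induction subject generalizing st with
  | nil => rfl
  | cons nlist rest ih => simp only [List.foldl_cons, nfp_inner, ih]

theorem nfp_flat (subject : List (List (List String))) (st : Option String × Option String) :
    subject.foldl (fun st nlist => nlist.foldl nfpPair st) st
      = (subject.flatMap (fun nlist => nlist)).foldl nfpPair st := by
  induction subject generalizing st with
  | nil => rfl
  | cons nlist rest ih => simp [List.foldl_append, ih]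

-- ===== VERDICT (by name: the statement is the Claim_ definition above) =====
theorem name_from_peer_spec : Claim_equal_name_from_peer := by
  intro peer _ _
  show name_from_peer peer = name_from_peer_alt peer
  have h := nfp_outer (((PySem.Dict.mk peer).get? "subject").getD []) (none, none)
  rw [show (nfpRho (none, none)) = none from rfl] at h
  have h2 := nfp_flat (((PySem.Dict.mk peer).get? "subject").getD []) (none, none)
  have h3 := nfpPair_fold ((((PySem.Dict.mk peer).get? "subject").getD []).flatMap (fun nlist => nlist)) (none, none)
  rw [h2, h3] at h
  simp only [name_from_peer, name_from_peer_alt, h]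
  cases hfu : ((((PySem.Dict.mk peer).get? "subject").getD []).flatMap (fun nlist => nlist)).reverse.find? nfpIsUid <;>
    cases hfc : ((((PySem.Dict.mk peer).get? "subject").getD []).flatMap (fun nlist => nlist)).reverse.find? nfpIsCn <;>
      simp_all [nfpRho, nfpOr]
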